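-- pv_equiv track=rewrite | github.com/lx827/CNN | tests/diagnosis/evaluation/datasets.py | _limit_files
-- ===== SOURCE A (Python) =====
-- from collections import defaultdict
--
-- MAX_PER_CLASS = 5  # 每个类别最多取5个文件，控制运行时间
--
-- def _limit_files(files, max_per_class=MAX_PER_CLASS):
--     class_files = defaultdict(list)
--     for f, info in files:
--         lbl = info.get("label", "unknown")
--         class_files[lbl].append((f, info))
--     result = []
--     for lbl in sorted(class_files.keys()):
--         result.extend(class_files[lbl][:max_per_class])
--     return result
-- ===== SOURCE B (Python) =====
-- MAX_PER_CLASS = 5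
--
-- def _limit_files(files, max_per_class=MAX_PER_CLASS):
--     labels = sorted({info.get("label", "unknown") for _, info in files})
--     return [p
--             for lbl in labels
--             for p in [q for q in files if q[1].get("label", "unknown") == lbl][:max_per_class]]
-- ===== Notes on version B (the rewrite author's own statement) =====
-- stated objective: simpler
-- what changed: B maintains no dict/defaultdict: it sorts the set of labels and, for each label in order, takes the first max_per_class files from one filtered scan of the input (the same [:max_per_class] slice as A, so negative limits behave identically).
import Mathlib
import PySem

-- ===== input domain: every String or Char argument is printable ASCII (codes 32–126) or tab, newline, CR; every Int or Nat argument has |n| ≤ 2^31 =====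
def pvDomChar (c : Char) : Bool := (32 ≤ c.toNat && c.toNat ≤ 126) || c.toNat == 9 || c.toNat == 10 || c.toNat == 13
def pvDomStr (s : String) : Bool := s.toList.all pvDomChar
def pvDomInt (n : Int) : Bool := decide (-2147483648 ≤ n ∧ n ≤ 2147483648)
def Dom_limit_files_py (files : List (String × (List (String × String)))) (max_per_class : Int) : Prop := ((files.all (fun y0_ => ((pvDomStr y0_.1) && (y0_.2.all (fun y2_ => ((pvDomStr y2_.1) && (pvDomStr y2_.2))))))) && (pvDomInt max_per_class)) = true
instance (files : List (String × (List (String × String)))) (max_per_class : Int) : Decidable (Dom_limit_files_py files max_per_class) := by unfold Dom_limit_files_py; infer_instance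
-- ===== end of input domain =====

-- B replaces A's defaultdict grouping by a sorted set of labels followed by one filtered
-- scan per label (objective: simpler — no dict is maintained).

-- info.get("label", "unknown")  (shared accessor, used by both ports)
def pvLabel (info : List (String × String)) : String :=
  PySem.Dict.getD (PySem.Dict.mk info) "label" "unknown"

-- ===== PORT A =====
-- class_files = defaultdict(list); for f, info in files: class_files[lbl].append((f, info))
-- result = []; for lbl in sorted(class_files.keys()): result.extend(class_files[lbl][:max_per_class])
def limit_files_py (files : List (String × (List (String × String)))) (max_per_class : Int) : List (String × (List (String × String))) :=
  let class_files : PySem.Dict String (List (String × (List (String × String)))) :=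
    files.foldl (fun d p => d.modify (pvLabel p.2) [] (· ++ [p])) PySem.Dict.empty
  (PySem.List.sorted class_files.keys (fun x => x) false).foldl
    (fun result lbl => result ++ PySem.List.slice (class_files.getD lbl []) none (some max_per_class)) []

-- ===== PORT B =====
-- labels = sorted({info.get("label","unknown") for _, info in files})
-- return [p for lbl in labels for p in [q for q in files if q[1].get(...) == lbl][:max_per_class]]
def limit_files_py_alt (files : List (String × (List (String × String)))) (max_per_class : Int) : List (String × (List (String × String))) :=
  let labels := PySem.List.sorted (PySem.Set.ofList (files.map (fun p => pvLabel p.2))) (fun x => x) false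
  labels.flatMap (fun lbl =>
    PySem.List.slice (files.filter (fun q => pvLabel q.2 == lbl)) none (some max_per_class))

-- ===== PRECONDITION & SPEC =====
def Spec_limit_files_py (files : List (String × (List (String × String)))) (max_per_class : Int) (out : List (String × (List (String × String)))) : Prop := out = limit_files_py_alt files max_per_class
instance (files : List (String × (List (String × String)))) (max_per_class : Int) (out : List (String × (List (String × String)))) : Decidable (Spec_limit_files_py files max_per_class out) := by unfold Spec_limit_files_py; infer_instance

-- ===== CLAIM (what is proved, stated in full; the proofs are below) =====
def Claim_equal_limit_files_py : Prop := ∀ (files : List (String × (List (String × String)))) (max_per_class : Int), Dom_limit_files_py files max_per_class → Spec_limit_files_py files max_per_class (limit_files_py files max_per_class)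

-- ===== LEMMAS AND PROOFS =====

-- the grouping dict's keys are the distinct labels in first-occurrence order
theorem pv_keys_eq (files : List (String × (List (String × String)))) :
    (files.foldl (fun d p => d.modify (pvLabel p.2) [] (· ++ [p])) PySem.Dict.empty).keys
      = PySem.Set.ofList (files.map (fun p => pvLabel p.2)) := by
  rw [PySem.Dict.keys_foldl_modify_key, PySem.Dict.keys_empty, PySem.Set.update_nil_left]

-- the grouping dict's entry at any label is the filter of files by that label
theorem pv_getD_eq (files : List (String × (List (String × String)))) (lbl : String) :
    (files.foldl (fun d p => d.modify (pvLabel p.2) [] (· ++ [p])) PySem.Dict.empty).getD lbl []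
      = files.filter (fun q => pvLabel q.2 == lbl) := by
  have h : files.foldl (fun d p => d.modify (pvLabel p.2) [] (· ++ [p])) PySem.Dict.empty
      = (files.map (fun p => (pvLabel p.2, p))).foldl
          (fun d q => d.modify q.1 [] (· ++ [q.2])) PySem.Dict.empty := by
    rw [List.foldl_map]
  rw [h, PySem.Dict.getD_foldl_modify_append, PySem.Dict.getD_empty]
  rw [List.filter_map]
  simp [Function.comp_def]

-- ===== VERDICT (by name: the statement is the Claim_ definition above) =====
theorem limit_files_py_spec : Claim_equal_limit_files_py := by
  intro files max_per_class _
  show limit_files_py files max_per_class = limit_files_py_alt files max_per_class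
  simp only [limit_files_py, limit_files_py_alt]
  rw [pv_keys_eq, PySem.List.foldl_append_eq_flatMap]
  exact List.flatMap_congr (fun lbl _ => by rw [pv_getD_eq])
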